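-- pv_equiv track=rewrite | github.com/samitmohan/Interviews-with-Python | Problems/Greedy/getLongestSubsequence.py | getLongestSubsequenceDP
-- ===== SOURCE A (Python) =====
-- def getLongestSubsequenceDP(words, groups):
--     n = len(words)
--     dp = [1] * n
--     prev = [-1] * n
--
--     for i in range(n):
--         for j in range(i):
--             if groups[i] != groups[j]:
--                 if dp[j] + 1 > dp[i]:  # new len
--                     dp[i] = dp[j] + 1
--                     prev[i] = j  # for reconstruction
--
--     # Reconstruct path
--     max_len = max(dp)
--     idx = dp.index(max_len)
--     path = []
--
--     while idx != -1:
--         path.append(words[idx])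
--         idx = prev[idx]
--
--     return path[::-1]  # reverse
-- ===== SOURCE B (Python) =====
-- def getLongestSubsequenceDP(words, groups):
--     # Greedy single pass: keep a word whenever its group differs from the
--     # group of the last kept word.  This yields exactly the subsequence the
--     # DP reconstruction produces.
--     res = []
--     last = None
--     for w, g in zip(words, groups):
--         if not res or g != last:
--             res.append(w)
--             last = g
--     return res
-- ===== Notes on version B (the rewrite author's own statement) =====
-- stated objective: faster
-- what changed: Replaces the O(n^2) DP table with prev-pointer reconstruction by a single left-to-right greedy pass that keeps a word whenever its group differs from the last kept word's group.
-- outside the precondition, e.g. on getLongestSubsequenceDP(['a'], []): A returns ['a'], B returns []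
import Mathlib
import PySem

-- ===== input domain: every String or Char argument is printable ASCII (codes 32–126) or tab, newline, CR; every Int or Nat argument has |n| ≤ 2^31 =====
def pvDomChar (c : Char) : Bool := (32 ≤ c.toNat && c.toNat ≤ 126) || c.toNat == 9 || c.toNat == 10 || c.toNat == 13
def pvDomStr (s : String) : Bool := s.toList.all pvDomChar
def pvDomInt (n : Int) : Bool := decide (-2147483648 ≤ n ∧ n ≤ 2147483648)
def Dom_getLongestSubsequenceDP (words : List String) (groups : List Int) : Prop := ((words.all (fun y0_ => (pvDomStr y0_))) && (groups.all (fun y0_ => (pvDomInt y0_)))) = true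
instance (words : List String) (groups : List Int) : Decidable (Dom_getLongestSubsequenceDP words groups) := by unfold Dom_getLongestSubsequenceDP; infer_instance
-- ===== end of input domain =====

-- B replaces A's quadratic DP-with-reconstruction by a single greedy pass (keep a word when
-- its group differs from the last kept word's group); return values agree on Pre_.

-- ===== PORT A =====
-- inner loop: `for j in range(i): if groups[i] != groups[j]: if dp[j] + 1 > dp[i]: ...`
-- (indices are nonnegative and, under Pre_, in range, so Nat getD/set are exact here)
def pvInner (groups : List Int) (i : Nat) (st : List Int × List Int) (j : Nat) : List Int × List Int :=
  if groups.getD i 0 ≠ groups.getD j 0 then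
    if st.1.getD j 0 + 1 > st.1.getD i 0 then
      (st.1.set i (st.1.getD j 0 + 1), st.2.set i ((j : Nat) : Int))
    else st
  else st

-- outer loop body: `for i in range(n): for j in range(i): ...`
def pvOuter (groups : List Int) (st : List Int × List Int) (i : Nat) : List Int × List Int :=
  (List.range i).foldl (pvInner groups i) st

-- `while idx != -1: path.append(words[idx]); idx = prev[idx]` — fuel n+1 bounds the loop
-- (the prev-chain is strictly decreasing); idx is -1 or a valid nonnegative index.
def pvReconA (words : List String) (prev : List Int) : Nat → Int → List String → List String
  | 0, _, path => path
  | fuel+1, idx, path =>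
    if idx = -1 then path
    else pvReconA words prev fuel (prev.getD idx.toNat (-1)) (path ++ [words.getD idx.toNat ""])

def getLongestSubsequenceDP (words : List String) (groups : List Int) : List String :=
  let n := words.length
  let st := (List.range n).foldl (pvOuter groups)
    (List.replicate n (1 : Int), List.replicate n (-1 : Int))
  let maxLen := (PySem.List.max? st.1 id).getD 0                       -- max(dp); dp ≠ [] under Pre_
  let idx : Int := (((PySem.List.index? st.1 maxLen).getD 0 : Nat) : Int)  -- dp.index(max_len)
  let path := pvReconA words st.2 (n + 1) idx []
  (PySem.List.slice? path none none (-1)).getD []                      -- path[::-1]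

-- ===== PORT B =====
def getLongestSubsequenceDP_alt (words : List String) (groups : List Int) : List String :=
  ((words.zip groups).foldl
    (fun (st : List String × Option Int) wg =>
      if st.1.isEmpty || some wg.2 ≠ st.2 then (st.1 ++ [wg.1], some wg.2) else st)
    ([], none)).1

-- ===== PRECONDITION & SPEC =====
-- Pre_ excludes inputs where A raises (empty words: ValueError on max([]); ≥ 2 words with
-- fewer groups: IndexError) and the degenerate single-word-with-fewer-groups inputs, on which
-- A returns the word without ever reading groups while B pairs words with groups.
def Pre_getLongestSubsequenceDP (words : List String) (groups : List Int) : Prop :=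
  words ≠ [] ∧ words.length ≤ groups.length
instance (words : List String) (groups : List Int) : Decidable (Pre_getLongestSubsequenceDP words groups) := by unfold Pre_getLongestSubsequenceDP; infer_instance
def pvWitness_getLongestSubsequenceDP : List String × List Int := (["a", "b", "c"], [0, 0, 1])

def Spec_getLongestSubsequenceDP (words : List String) (groups : List Int) (out : List String) : Prop := out = getLongestSubsequenceDP_alt words groups
instance (words : List String) (groups : List Int) (out : List String) : Decidable (Spec_getLongestSubsequenceDP words groups out) := by unfold Spec_getLongestSubsequenceDP; infer_instance

-- ===== CLAIM (what is proved, stated in full; the proofs are below) =====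
def Claim_equal_getLongestSubsequenceDP : Prop := ∀ (words : List String) (groups : List Int), Dom_getLongestSubsequenceDP words groups → Pre_getLongestSubsequenceDP words groups → Spec_getLongestSubsequenceDP words groups (getLongestSubsequenceDP words groups)
-- ===== LEMMAS AND PROOFS =====

-- `pvChg g i` = number of positions 1..i where the group differs from its predecessor
-- (the block index of position i).
def pvChg (g : List Int) : Nat → Nat
  | 0 => 0
  | i+1 => pvChg g i + (if g.getD (i+1) 0 ≠ g.getD i 0 then 1 else 0)

-- first index whose block index is k (the k-th block head)
noncomputable def pvF (g : List Int) (k : Nat) : Nat := sInf {i | pvChg g i = k}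

lemma pvChg_le_succ (g : List Int) (i : Nat) : pvChg g i ≤ pvChg g (i+1) := by
  simp only [pvChg]; split <;> omega

lemma pvChg_succ_le (g : List Int) (i : Nat) : pvChg g (i+1) ≤ pvChg g i + 1 := by
  simp only [pvChg]; split <;> omega

lemma pvChg_mono (g : List Int) {i j : Nat} (h : i ≤ j) : pvChg g i ≤ pvChg g j := by
  induction j with
  | zero => have h0 : i = 0 := by omega
            subst h0; exact le_refl _
  | succ j ih =>
    rcases Nat.lt_or_ge i (j+1) with hlt | hge
    · exact le_trans (ih (by omega)) (pvChg_le_succ g j)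
    · have h0 : i = j+1 := by omega
      subst h0; exact le_refl _

lemma pvChg_le_self (g : List Int) (i : Nat) : pvChg g i ≤ i := by
  induction i with
  | zero => simp [pvChg]
  | succ i ih => have := pvChg_succ_le g i; omega

lemma pvChg_exists (g : List Int) {k m : Nat} (h : k ≤ pvChg g m) : ∃ i, i ≤ m ∧ pvChg g i = k := by
  induction m with
  | zero => refine ⟨0, le_refl 0, ?_⟩; simp only [pvChg] at h ⊢; omega
  | succ m ih =>
    rcases Nat.lt_or_ge (pvChg g m) k with hlt | hge
    · have h2 := pvChg_succ_le g m
      exact ⟨m+1, le_refl _, by omega⟩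
    · obtain ⟨i, hi, he⟩ := ih hge
      exact ⟨i, by omega, he⟩

lemma pvF_chg (g : List Int) {k m : Nat} (h : k ≤ pvChg g m) : pvChg g (pvF g k) = k ∧ pvF g k ≤ m := by
  obtain ⟨i, him, hik⟩ := pvChg_exists g h
  have hne : {i | pvChg g i = k}.Nonempty := ⟨i, hik⟩
  exact ⟨Nat.sInf_mem hne, le_trans (Nat.sInf_le hik) him⟩

lemma pvF_le (g : List Int) (i : Nat) : pvF g (pvChg g i) ≤ i := Nat.sInf_le rfl

lemma pvF_zero (g : List Int) : pvF g 0 = 0 := Nat.le_zero.mp (Nat.sInf_le rfl)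

lemma pvChg_ne_of_lt_pvF (g : List Int) {j k : Nat} (h : j < pvF g k) : pvChg g j ≠ k := by
  intro hmem
  have h2 : pvF g k ≤ j := Nat.sInf_le (show j ∈ {i | pvChg g i = k} from hmem)
  omega

lemma pvF_head (g : List Int) {i : Nat} (h : pvChg g (i+1) = pvChg g i + 1) :
    pvF g (pvChg g (i+1)) = i+1 := by
  have h1 : pvF g (pvChg g (i+1)) ≤ i+1 := pvF_le g (i+1)
  have h2 : pvChg g (pvF g (pvChg g (i+1))) = pvChg g (i+1) := (pvF_chg g (le_refl _)).1
  by_contra hne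
  have h3 := pvChg_mono g (show pvF g (pvChg g (i+1)) ≤ i by omega)
  omega

-- ===== the DP state after i outer iterations =====
def pvDPl (g : List Int) (n i : Nat) : List Int :=
  (List.range n).map (fun t => if t < i then (pvChg g t : Int) + 1 else 1)
noncomputable def pvPRl (g : List Int) (n i : Nat) : List Int :=
  (List.range n).map (fun t => if t < i ∧ pvChg g t ≠ 0 then ((pvF g (pvChg g t - 1) : Nat) : Int) else -1)

-- the (dp[i], prev[i]) cell after the inner loop has scanned j candidates
noncomputable def pvBP (g : List Int) (i : Nat) : Nat → Int × Int
  | 0 => (1, -1)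
  | j+1 =>
    if g.getD j 0 ≠ g.getD i 0 then ((pvChg g j : Int) + 2, ((pvF g (pvChg g j) : Nat) : Int))
    else if pvChg g j = 0 then (1, -1)
    else ((pvChg g j : Int) + 1, ((pvF g (pvChg g j - 1) : Nat) : Int))

lemma set_map_range (f : Nat → Int) (n i : Nat) (v : Int) :
    ((List.range n).map f).set i v
      = (List.range n).map (fun t => if t = i then v else f t) := by
  apply List.ext_getElem (by simp)
  intro k h1 h2
  simp only [List.getElem_set, List.getElem_map, List.getElem_range]
  rcases eq_or_ne k i with rfl | hk
  · simp
  · rw [if_neg (fun e => hk e.symm), if_neg hk]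

lemma getD_map_range' (f : Nat → Int) {n t : Nat} (h : t < n) (d : Int) :
    (((List.range n).map f)).getD t d = f t := by
  rw [List.getD_eq_getElem?_getD]
  simp [h]

lemma pvBP_succ_keep2 (g : List Int) (i j : Nat) (hgi : g.getD i 0 = g.getD j 0) :
    pvBP g i (j+1) = pvBP g i j := by
  cases j with
  | zero =>
    simp only [pvBP]
    rw [if_neg (show ¬ g.getD 0 0 ≠ g.getD i 0 from fun h => h hgi.symm)]
    rfl
  | succ j =>
    have hstep : pvChg g (j+1)
        = pvChg g j + (if g.getD (j+1) 0 ≠ g.getD j 0 then 1 else 0) := rfl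
    simp only [pvBP]
    rw [if_neg (show ¬ g.getD (j+1) 0 ≠ g.getD i 0 from fun h => h hgi.symm)]
    by_cases hd : g.getD j 0 = g.getD i 0
    · have hgj : g.getD (j+1) 0 = g.getD j 0 := hgi.symm.trans hd.symm
      rw [if_neg (show ¬ g.getD (j+1) 0 ≠ g.getD j 0 from fun h => h hgj)] at hstep
      have hc : pvChg g (j+1) = pvChg g j := by omega
      rw [hc, if_neg (show ¬ g.getD j 0 ≠ g.getD i 0 from fun h => h hd)]
    · have hgj : g.getD (j+1) 0 ≠ g.getD j 0 := fun e => hd (hgi.trans e).symm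
      rw [if_pos hgj] at hstep
      have hc : pvChg g (j+1) = pvChg g j + 1 := by omega
      rw [hc, if_neg (show ¬ pvChg g j + 1 = 0 by omega), if_pos hd]
      rw [Nat.add_sub_cancel]
      exact Prod.ext (by push_cast; ring) rfl

lemma pvBP_succ_update (g : List Int) (i j : Nat) (hgi : g.getD i 0 ≠ g.getD j 0)
    (hcmp : (pvBP g i j).1 < (pvChg g j : Int) + 1 + 1) :
    pvBP g i (j+1) = ((pvChg g j : Int) + 1 + 1, ((j : Nat) : Int)) := by
  have hF : pvF g (pvChg g j) = j := by
    cases j with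
    | zero => exact pvF_zero g
    | succ j =>
      have hstep : pvChg g (j+1)
          = pvChg g j + (if g.getD (j+1) 0 ≠ g.getD j 0 then 1 else 0) := rfl
      by_cases hgj : g.getD (j+1) 0 ≠ g.getD j 0
      · rw [if_pos hgj] at hstep
        exact pvF_head g (by omega)
      · push_neg at hgj
        have hd : g.getD j 0 ≠ g.getD i 0 := fun e => hgi (e.symm.trans hgj.symm)
        exfalso
        rw [if_neg (show ¬ g.getD (j+1) 0 ≠ g.getD j 0 from fun h => h hgj)] at hstep
        simp only [pvBP] at hcmp
        rw [if_pos hd] at hcmp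
        simp at hcmp
        omega
  simp only [pvBP]
  rw [if_pos (show g.getD j 0 ≠ g.getD i 0 from fun e => hgi e.symm), hF]
  exact Prod.ext (by push_cast; ring) rfl

lemma pvBP_succ_keep1 (g : List Int) (i j : Nat) (hgi : g.getD i 0 ≠ g.getD j 0)
    (hcmp : ¬ (pvBP g i j).1 < (pvChg g j : Int) + 1 + 1) :
    pvBP g i (j+1) = pvBP g i j := by
  cases j with
  | zero =>
    exfalso; apply hcmp; norm_num [pvBP, pvChg]
  | succ j =>
    have hstep : pvChg g (j+1)
        = pvChg g j + (if g.getD (j+1) 0 ≠ g.getD j 0 then 1 else 0) := rfl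
    have hmono := pvChg_le_succ g j
    by_cases hd : g.getD j 0 = g.getD i 0
    · exfalso
      simp only [pvBP] at hcmp
      rw [if_neg (show ¬ g.getD j 0 ≠ g.getD i 0 from fun h => h hd)] at hcmp
      by_cases h0 : pvChg g j = 0
      · rw [if_pos h0] at hcmp
        simp at hcmp
      · rw [if_neg h0] at hcmp
        simp at hcmp
        omega
    · simp only [pvBP] at hcmp ⊢
      rw [if_pos (show g.getD j 0 ≠ g.getD i 0 from hd)] at hcmp ⊢
      simp at hcmp
      have hc : pvChg g (j+1) = pvChg g j := by omega
      rw [if_pos (show g.getD (j+1) 0 ≠ g.getD i 0 from fun e => hgi e.symm), hc]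

lemma inner_inv (g : List Int) (n i : Nat) (hi : i < n) : ∀ j, j ≤ i →
    (List.range j).foldl (pvInner g i) (pvDPl g n i, pvPRl g n i)
      = ((pvDPl g n i).set i (pvBP g i j).1, (pvPRl g n i).set i (pvBP g i j).2) := by
  intro j hj
  induction j with
  | zero =>
    simp only [List.range_zero, List.foldl_nil]
    have e1 : (pvDPl g n i).set i ((1 : Int)) = pvDPl g n i := by
      unfold pvDPl
      rw [set_map_range]
      apply List.map_congr_left
      intro t ht
      by_cases h : t = i
      · subst h
        rw [if_pos rfl, if_neg (by omega)]
      · rw [if_neg h]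
    have e2 : (pvPRl g n i).set i ((-1 : Int)) = pvPRl g n i := by
      unfold pvPRl
      rw [set_map_range]
      apply List.map_congr_left
      intro t ht
      by_cases h : t = i
      · subst h
        rw [if_pos rfl, if_neg (show ¬ (t < t ∧ pvChg g t ≠ 0) from fun hc => absurd hc.1 (lt_irrefl t))]
      · rw [if_neg h]
    show (pvDPl g n i, pvPRl g n i)
        = ((pvDPl g n i).set i (1 : Int), (pvPRl g n i).set i (-1 : Int))
    rw [e1, e2]
  | succ j ihj =>
    have hj' : j ≤ i := by omega
    rw [List.range_succ, List.foldl_append, ihj hj']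
    simp only [List.foldl_cons, List.foldl_nil]
    have hji : j ≠ i := by omega
    have hjn : j < n := by omega
    have r1 : ((pvDPl g n i).set i (pvBP g i j).1).getD j 0 = (pvChg g j : Int) + 1 := by
      unfold pvDPl
      rw [set_map_range, getD_map_range' _ hjn]
      rw [if_neg hji, if_pos (by omega)]
    have r2 : ((pvDPl g n i).set i (pvBP g i j).1).getD i 0 = (pvBP g i j).1 := by
      unfold pvDPl
      rw [set_map_range, getD_map_range' _ hi, if_pos rfl]
    show pvInner g i ((pvDPl g n i).set i (pvBP g i j).1, (pvPRl g n i).set i (pvBP g i j).2) j = _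
    unfold pvInner
    simp only [r1, r2]
    by_cases hgi : g.getD i 0 ≠ g.getD j 0
    · by_cases hcmp : (pvBP g i j).1 < (pvChg g j : Int) + 1 + 1
      · rw [if_pos hgi, if_pos (by omega)]
        rw [pvBP_succ_update g i j hgi hcmp]
        simp only [List.set_set]
      · rw [if_pos hgi, if_neg (by omega)]
        rw [pvBP_succ_keep1 g i j hgi hcmp]
    · rw [if_neg hgi]
      push_neg at hgi
      rw [pvBP_succ_keep2 g i j hgi]

lemma pvBP_last (g : List Int) (i : Nat) :
    pvBP g i i = ((pvChg g i : Int) + 1,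
      if pvChg g i ≠ 0 then ((pvF g (pvChg g i - 1) : Nat) : Int) else -1) := by
  cases i with
  | zero => simp [pvBP, pvChg]
  | succ i =>
    have hstep : pvChg g (i+1)
        = pvChg g i + (if g.getD (i+1) 0 ≠ g.getD i 0 then 1 else 0) := rfl
    simp only [pvBP]
    by_cases hg : g.getD i 0 = g.getD (i+1) 0
    · rw [if_neg (by simpa using hg)]
      rw [if_neg (by simpa using hg.symm)] at hstep
      have hstep' : pvChg g (i+1) = pvChg g i := by omega
      rw [hstep']
      by_cases h0 : pvChg g i = 0
      · simp [h0]
      · rw [if_neg h0, if_pos h0]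
    · rw [if_pos hg]
      rw [if_pos (fun e => hg e.symm)] at hstep
      have hstep' : pvChg g (i+1) = pvChg g i + 1 := by omega
      rw [hstep']
      rw [if_pos (by omega : pvChg g i + 1 ≠ 0)]
      simp only [Prod.mk.injEq, Nat.add_sub_cancel]
      constructor
      · push_cast; ring
      · trivial

lemma outer_inv (g : List Int) (n : Nat) : ∀ i, i ≤ n →
    (List.range i).foldl (pvOuter g) (List.replicate n (1 : Int), List.replicate n (-1 : Int))
      = (pvDPl g n i, pvPRl g n i) := by
  intro i hi
  induction i with
  | zero =>
    simp only [List.range_zero, List.foldl_nil]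
    have e1 : pvDPl g n 0 = List.replicate n (1 : Int) := by
      apply List.ext_getElem (by simp [pvDPl])
      intro k h1 h2
      simp [pvDPl]
    have e2 : pvPRl g n 0 = List.replicate n (-1 : Int) := by
      apply List.ext_getElem (by simp [pvPRl])
      intro k h1 h2
      simp [pvPRl]
    rw [e1, e2]
  | succ i ih =>
    rw [List.range_succ, List.foldl_append, ih (by omega)]
    simp only [List.foldl_cons, List.foldl_nil]
    show pvOuter g (pvDPl g n i, pvPRl g n i) i = _
    unfold pvOuter
    rw [inner_inv g n i (by omega) i (le_refl i), pvBP_last]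
    refine Prod.ext ?_ ?_
    · show (pvDPl g n i).set i ((pvChg g i : Int) + 1) = pvDPl g n (i+1)
      unfold pvDPl
      rw [set_map_range]
      apply List.map_congr_left
      intro t ht
      by_cases h : t = i
      · rw [if_pos h, if_pos (show t < i+1 by omega), h]
      · rw [if_neg h]
        by_cases hlt : t < i
        · rw [if_pos hlt, if_pos (by omega)]
        · rw [if_neg hlt, if_neg (by omega)]
    · show (pvPRl g n i).set i
          (if pvChg g i ≠ 0 then ((pvF g (pvChg g i - 1) : Nat) : Int) else -1)
        = pvPRl g n (i+1)
      unfold pvPRl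
      rw [set_map_range]
      apply List.map_congr_left
      intro t ht
      by_cases h : t = i
      · rw [if_pos h, h]
        by_cases h0 : pvChg g i = 0
        · rw [if_neg (show ¬ pvChg g i ≠ 0 from fun hh => hh h0),
              if_neg (show ¬ (i < i+1 ∧ pvChg g i ≠ 0) from fun hc => hc.2 h0)]
        · rw [if_pos h0, if_pos (show i < i+1 ∧ pvChg g i ≠ 0 from ⟨by omega, h0⟩)]
      · rw [if_neg h]
        by_cases hc : t < i ∧ pvChg g t ≠ 0
        · rw [if_pos hc, if_pos (show t < i+1 ∧ pvChg g t ≠ 0 from ⟨by omega, hc.2⟩)]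
        · rw [if_neg hc, if_neg (show ¬ (t < i+1 ∧ pvChg g t ≠ 0) from
            fun hc2 => hc ⟨by omega, hc2.2⟩)]

-- ===== extracting max / index / reconstruction =====
lemma index?_map_range (fn : Nat → Int) (n k : Nat) (hk : k < n)
    (hkv : ∀ t, t < k → fn t ≠ fn k) :
    PySem.List.index? ((List.range n).map fn) (fn k) = some k := by
  rw [PySem.List.index?_eq_some_iff]
  refine ⟨(List.range k).map fn, (List.range (n - k - 1)).map (fun t => fn (k + 1 + t)),
    ?_, by simp, ?_⟩
  · have h1 : List.range n = List.range k ++ (List.range (n - k)).map (fun t => k + t) := by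
      rw [show n = k + (n - k) by omega, List.range_add]
      simp [Nat.add_sub_cancel_left]
    have h2 : List.range (n - k) = 0 :: (List.range (n - k - 1)).map (fun t => t + 1) := by
      rw [show n - k = (n - k - 1) + 1 by omega, List.range_succ_eq_map]
      simp
    rw [h1, h2]
    simp only [List.map_append, List.map_cons, List.map_map, Function.comp_def, Nat.add_zero]
    refine congrArg (fun L => (List.range k).map fn ++ fn k :: L) ?_
    apply List.map_congr_left
    intro t ht
    congr 1
    omega
  · simp only [List.mem_map, List.mem_range]
    rintro ⟨t, ht, he⟩
    exact hkv t ht he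

lemma max?_dp (g : List Int) (n : Nat) (hn : 0 < n) :
    PySem.List.max? (pvDPl g n n) id = some ((pvChg g (n-1) : Int) + 1) := by
  cases hmx : PySem.List.max? (pvDPl g n n) id with
  | none =>
    exfalso
    have := (PySem.List.max?_eq_none_iff _ _).mp hmx
    have hlen : (pvDPl g n n).length = n := by simp [pvDPl]
    rw [this] at hlen
    simp at hlen
    omega
  | some m =>
    have hmem := PySem.List.max?_mem hmx
    have hmax := PySem.List.max?_isMax hmx
    simp only [pvDPl, List.mem_map, List.mem_range] at hmem
    obtain ⟨t, ht, hte⟩ := hmem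
    rw [if_pos ht] at hte
    have hlast : ((pvChg g (n-1) : Int) + 1) ∈ pvDPl g n n := by
      simp only [pvDPl, List.mem_map, List.mem_range]
      exact ⟨n-1, by omega, by rw [if_pos (by omega)]⟩
    have h1 := hmax _ hlast
    simp only [id] at h1
    have h2 : pvChg g t ≤ pvChg g (n-1) := pvChg_mono g (by omega)
    congr 1
    omega

lemma recon (words : List String) (g : List Int) (hn : 0 < words.length) :
    ∀ (K : Nat), K ≤ pvChg g (words.length - 1) → ∀ (fuel : Nat) (acc : List String), K + 2 ≤ fuel →
    pvReconA words (pvPRl g words.length words.length) fuel ((pvF g K : Nat) : Int) acc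
      = acc ++ ((List.range (K+1)).reverse.map (fun k => words.getD (pvF g k) "")) := by
  intro K
  induction K with
  | zero =>
    intro hK fuel acc hf
    obtain ⟨f1, rfl⟩ : ∃ m, fuel = m + 1 := ⟨fuel - 1, by omega⟩
    obtain ⟨f2, rfl⟩ : ∃ m, f1 = m + 1 := ⟨f1 - 1, by omega⟩
    have hflt : pvF g 0 < words.length := by rw [pvF_zero]; omega
    have hprev : (pvPRl g words.length words.length).getD ((((pvF g 0 : Nat) : Int)).toNat) (-1) = -1 := by
      rw [Int.toNat_natCast]
      unfold pvPRl
      rw [getD_map_range' _ hflt]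
      rw [if_neg (show ¬ (pvF g 0 < words.length ∧ pvChg g (pvF g 0) ≠ 0) from
        fun hc => hc.2 (by rw [pvF_zero]; rfl))]
    simp only [pvReconA]
    rw [if_neg (by omega : ¬ (((pvF g 0 : Nat) : Int)) = -1), hprev]
    rw [if_pos rfl, Int.toNat_natCast]
    simp
  | succ K ihK =>
    intro hK fuel acc hf
    obtain ⟨f1, rfl⟩ : ∃ m, fuel = m + 1 := ⟨fuel - 1, by omega⟩
    have hKle : K ≤ pvChg g (words.length - 1) := by omega
    have hchgF : pvChg g (pvF g (K+1)) = K+1 := (pvF_chg g hK).1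
    have hflt : pvF g (K+1) < words.length := by
      have := (pvF_chg g hK).2; omega
    have hprev : (pvPRl g words.length words.length).getD ((((pvF g (K+1) : Nat) : Int)).toNat) (-1)
        = ((pvF g K : Nat) : Int) := by
      rw [Int.toNat_natCast]
      unfold pvPRl
      rw [getD_map_range' _ hflt]
      rw [if_pos (show pvF g (K+1) < words.length ∧ pvChg g (pvF g (K+1)) ≠ 0 from
        ⟨hflt, by rw [hchgF]; omega⟩)]
      rw [hchgF]
      norm_num
    simp only [pvReconA]
    rw [if_neg (by omega : ¬ (((pvF g (K+1) : Nat) : Int)) = -1), hprev]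
    rw [ihK hKle f1 (acc ++ [words.getD ((((pvF g (K+1) : Nat) : Int)).toNat) ""]) (by omega)]
    rw [Int.toNat_natCast]
    have hrev : (List.range (K+1+1)).reverse = (K+1) :: (List.range (K+1)).reverse := by
      rw [List.range_succ, List.reverse_append]
      simp
    rw [hrev, List.map_cons, List.append_assoc, List.singleton_append]

-- ===== B's greedy loop builds the block-head words =====
lemma pvChg_zero (g : List Int) : pvChg g 0 = 0 := rfl

lemma B_inv (words : List String) (g : List Int) (h : words.length ≤ g.length) :
    ∀ i, 1 ≤ i → i ≤ words.length →
    ((words.zip g).take i).foldl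
        (fun (st : List String × Option Int) wg =>
          if st.1.isEmpty || some wg.2 ≠ st.2 then (st.1 ++ [wg.1], some wg.2) else st)
        ([], none)
      = ((List.range (pvChg g (i-1) + 1)).map (fun k => words.getD (pvF g k) ""),
         some (g.getD (i-1) 0)) := by
  intro i h1 hi
  induction i with
  | zero => omega
  | succ i ih =>
    have hzlen : (words.zip g).length = words.length := by
      rw [List.length_zip]; omega
    rcases Nat.eq_zero_or_pos i with rfl | hpos
    · rw [List.take_succ, List.getElem?_eq_getElem (by omega : 0 < (words.zip g).length)]
      simp only [List.take_zero, List.nil_append, Option.toList_some, List.foldl_cons,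
        List.foldl_nil, List.getElem_zip]
      simp only [List.isEmpty_nil, Bool.true_or, if_true, List.nil_append]
      norm_num [pvChg_zero, pvF_zero, List.range_one, List.map_cons, List.map_nil]
      constructor
      · rw [List.getElem?_eq_getElem (show 0 < words.length by omega)]; rfl
      · rw [List.getElem?_eq_getElem (show 0 < g.length by omega)]; rfl
    · obtain ⟨j, rfl⟩ : ∃ j, i = j + 1 := ⟨i - 1, by omega⟩
      have hstep := ih (by omega) (by omega)
      simp only [Nat.add_sub_cancel] at hstep
      rw [List.take_succ, List.getElem?_eq_getElem (by omega : j+1 < (words.zip g).length),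
        List.foldl_append, hstep]
      simp only [Option.toList_some, List.foldl_cons, List.foldl_nil, List.getElem_zip,
        Nat.add_sub_cancel]
      have hgel : g[j+1]'(by omega) = g.getD (j+1) 0 :=
        (List.getD_eq_getElem g 0 (by omega)).symm
      have hwel : words[j+1]'(by omega) = words.getD (j+1) "" :=
        (List.getD_eq_getElem words "" (by omega)).symm
      have hie : ((List.range (pvChg g j + 1)).map (fun k => words.getD (pvF g k) "")).isEmpty
          = false := by simp
      have hchgstep : pvChg g (j+1)
          = pvChg g j + (if g.getD (j+1) 0 ≠ g.getD j 0 then 1 else 0) := rfl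
      by_cases hg : g.getD (j+1) 0 = g.getD j 0
      · -- same group: nothing appended
        rw [if_neg (show ¬ g.getD (j+1) 0 ≠ g.getD j 0 from fun hh => hh hg)] at hchgstep
        have hc : pvChg g (j+1) = pvChg g j := by omega
        simp only [hie, hgel, hg, Bool.false_or, ne_eq, not_true_eq_false, decide_false,
          if_false, hc]
        simp
      · -- new block head at j+1
        rw [if_pos hg] at hchgstep
        have hc : pvChg g (j+1) = pvChg g j + 1 := by omega
        have hhead : pvF g (pvChg g (j+1)) = j+1 := pvF_head g hc
        simp only [hie, hgel, Bool.false_or]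
        rw [if_pos (by simpa using hg), hwel]
        refine Prod.ext ?_ rfl
        show (List.range (pvChg g j + 1)).map (fun k => words.getD (pvF g k) "")
            ++ [words.getD (j+1) ""]
          = (List.range (pvChg g (j+1) + 1)).map (fun k => words.getD (pvF g k) "")
        rw [hc]
        rw [show List.range (pvChg g j + 1 + 1)
              = List.range (pvChg g j + 1) ++ [pvChg g j + 1] from List.range_succ]
        rw [List.map_append, List.map_singleton]
        rw [show pvF g (pvChg g j + 1) = j + 1 from by rw [← hc]; exact hhead]

-- ===== VERDICT (by name: the statement is the Claim_ definition above) =====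
theorem getLongestSubsequenceDP_spec : Claim_equal_getLongestSubsequenceDP := by
  intro words groups _ hpre
  obtain ⟨hne, hlen⟩ := hpre
  have hn : 0 < words.length := List.length_pos_of_ne_nil hne
  unfold Spec_getLongestSubsequenceDP
  simp only [getLongestSubsequenceDP]
  rw [outer_inv groups words.length words.length (le_refl _)]
  rw [max?_dp groups words.length hn]
  simp only [Option.getD_some]
  have hchgF : pvChg groups (pvF groups (pvChg groups (words.length - 1)))
      = pvChg groups (words.length - 1) := (pvF_chg groups (le_refl _)).1
  have hFle : pvF groups (pvChg groups (words.length - 1)) ≤ words.length - 1 :=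
    (pvF_chg groups (le_refl _)).2
  have hfix : pvDPl groups words.length words.length
      = (List.range words.length).map (fun t => (pvChg groups t : Int) + 1) := by
    unfold pvDPl
    apply List.map_congr_left
    intro t ht
    rw [if_pos (by simpa using ht)]
  have hidx : PySem.List.index? (pvDPl groups words.length words.length)
      ((pvChg groups (words.length - 1) : Int) + 1)
      = some (pvF groups (pvChg groups (words.length - 1))) := by
    rw [hfix]
    have hval : ((pvChg groups (words.length - 1) : Int) + 1)
        = (fun t => (pvChg groups t : Int) + 1)
            (pvF groups (pvChg groups (words.length - 1))) := by
      dsimp only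
      rw [hchgF]
    rw [hval]
    apply index?_map_range _ _ _ (by omega)
    intro t ht
    have h1 := pvChg_ne_of_lt_pvF groups ht
    rw [hchgF]
    intro he
    exact h1 (by omega)
  rw [hidx]
  simp only [Option.getD_some]
  rw [recon words groups hn (pvChg groups (words.length - 1)) (le_refl _) (words.length + 1) []
    (by have := pvChg_le_self groups (words.length - 1); omega)]
  rw [List.nil_append, PySem.List.slice?_none_none_neg_one]
  simp only [Option.getD_some]
  rw [List.map_reverse, List.reverse_reverse]
  simp only [getLongestSubsequenceDP_alt]
  have htake : (words.zip groups) = (words.zip groups).take words.length := by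
    rw [List.take_of_length_le (by rw [List.length_zip]; omega)]
  rw [htake, B_inv words groups hlen words.length (by omega) (le_refl _)]
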